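-- pv_equiv track=rewrite | github.com/piepor/attribute-driven-trace-clustering | utils/directly_follow_graph.py | check_start_act_to_include
-- ===== SOURCE A (Python) =====
-- def check_start_act_to_include(dfg, start_activities):
--     """
--     given the Directly Follow Graph and start activities,
--     checks if all the activities in start_activities have to be included.
--     Needed for example if the dfg has been filtered and the new start
--     activities have to be computed
--     """
--     start_to_include = {}
--     for start_act in start_activities:
--         for tail, _ in dfg:
--             if tail == start_act:
--                 start_to_include[start_act] = start_activities[start_act]
--                 break
--     return start_to_include
-- ===== SOURCE B (Python) =====
-- def check_start_act_to_include(dfg, start_activities):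
--     """
--     given the Directly Follow Graph and start activities,
--     checks if all the activities in start_activities have to be included.
--     """
--     keys = list(start_activities)
--     pos = {act: i for i, act in enumerate(keys)}
--     hit = [False] * len(keys)
--     for tail, _ in dfg:
--         i = pos.get(tail)
--         if i is not None:
--             hit[i] = True
--     return {keys[i]: start_activities[keys[i]] for i in range(len(keys)) if hit[i]}
-- ===== Notes on version B (the rewrite author's own statement) =====
-- stated objective: faster
-- what changed: B inverts the loop driver: it builds a key->position dict once, then a single pass over dfg edges marks a boolean hit array by position, and one indexed pass emits the marked entries, replacing A's nested scan-with-break over dfg per start activity.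
import Mathlib
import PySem

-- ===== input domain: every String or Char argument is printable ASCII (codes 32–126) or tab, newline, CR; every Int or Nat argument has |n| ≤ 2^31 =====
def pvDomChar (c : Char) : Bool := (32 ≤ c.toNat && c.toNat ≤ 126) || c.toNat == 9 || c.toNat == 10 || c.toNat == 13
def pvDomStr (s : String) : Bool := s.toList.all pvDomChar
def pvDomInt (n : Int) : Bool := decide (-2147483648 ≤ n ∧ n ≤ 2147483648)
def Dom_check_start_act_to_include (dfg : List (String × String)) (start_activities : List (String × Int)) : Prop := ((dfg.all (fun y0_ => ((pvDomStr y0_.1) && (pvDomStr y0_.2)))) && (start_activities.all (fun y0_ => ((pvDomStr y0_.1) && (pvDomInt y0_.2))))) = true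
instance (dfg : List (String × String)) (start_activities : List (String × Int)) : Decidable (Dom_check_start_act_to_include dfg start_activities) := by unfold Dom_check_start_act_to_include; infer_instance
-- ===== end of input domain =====

-- B inverts the loop driver: a key->position dict plus one pass over dfg marking a boolean
-- hit array, then one indexed pass emitting the marked entries (objective: faster).

-- ===== PORT A =====
-- inner 'for tail, _ in dfg: if tail == start_act: ...; break' — scan with break
def pvScanTail (dfg : List (String × String)) (k : String) : Bool :=
  match dfg with
  | [] => false
  | (t, _) :: rest => if t == k then true else pvScanTail rest k

-- A iterates the keys of the start_activities dict and looks each key up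
-- (start_activities[start_act]); the key is always present, so getD's default is never used.
def check_start_act_to_include (dfg : List (String × String)) (start_activities : List (String × Int)) : List (String × Int) :=
  ((start_activities.map Prod.fst).foldl
    (fun (acc : PySem.Dict String Int) k =>
      if pvScanTail dfg k then acc.insert k ((PySem.Dict.mk start_activities).getD k 0) else acc)
    PySem.Dict.empty).items

-- ===== PORT B =====
-- B: keys = list(start_activities); pos = {act: i for i, act in enumerate(keys)};
-- hit = [False]*len(keys); one pass over dfg sets hit[pos[tail]]; final indexed pass
-- {keys[i]: start_activities[keys[i]] for i in range(len(keys)) if hit[i]}.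
def check_start_act_to_include_alt (dfg : List (String × String)) (start_activities : List (String × Int)) : List (String × Int) :=
  let keys := start_activities.map Prod.fst
  let pos : PySem.Dict String Int :=
    (PySem.List.enumerate keys).foldl (fun d p => d.insert p.2 p.1) PySem.Dict.empty
  let hit : List Bool :=
    dfg.foldl (fun h e =>
      match pos.get? e.1 with
      | some i => PySem.List.pySetD h i true
      | none => h) (List.replicate keys.length false)
  ((PySem.List.pyRange 0 (keys.length : Int) 1).foldl
    (fun (d : PySem.Dict String Int) i =>
      if PySem.List.pyGetD hit i false then
        d.insert (PySem.List.pyGetD keys i "")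
          ((PySem.Dict.mk start_activities).getD (PySem.List.pyGetD keys i "") 0)
      else d)
    PySem.Dict.empty).items

-- ===== PRECONDITION & SPEC =====
-- Pre_ excludes association lists with duplicate keys in start_activities: the Python
-- parameter is a dict, which cannot hold duplicate keys, so such lists represent no Python input.
def Pre_check_start_act_to_include (dfg : List (String × String)) (start_activities : List (String × Int)) : Prop :=
  (start_activities.map Prod.fst).Nodup
instance (dfg : List (String × String)) (start_activities : List (String × Int)) : Decidable (Pre_check_start_act_to_include dfg start_activities) := by unfold Pre_check_start_act_to_include; infer_instance
def pvWitness_check_start_act_to_include : (List (String × String)) × (List (String × Int)) :=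
  ([("a", "b")], [("a", 1), ("c", 2)])
def Spec_check_start_act_to_include (dfg : List (String × String)) (start_activities : List (String × Int)) (out : List (String × Int)) : Prop := out = check_start_act_to_include_alt dfg start_activities
instance (dfg : List (String × String)) (start_activities : List (String × Int)) (out : List (String × Int)) : Decidable (Spec_check_start_act_to_include dfg start_activities out) := by unfold Spec_check_start_act_to_include; infer_instance

-- ===== CLAIM (what is proved, stated in full; the proofs are below) =====
def Claim_equal_check_start_act_to_include : Prop := ∀ (dfg : List (String × String)) (start_activities : List (String × Int)), Dom_check_start_act_to_include dfg start_activities → Pre_check_start_act_to_include dfg start_activities → Spec_check_start_act_to_include dfg start_activities (check_start_act_to_include dfg start_activities)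

-- ===== LEMMAS AND PROOFS =====

-- A's inner scan-with-break is an existence test over the edge tails
theorem pvScanTail_eq_any (dfg : List (String × String)) (k : String) :
    pvScanTail dfg k = dfg.any (fun e => e.1 == k) := by
  induction dfg with
  | nil => rfl
  | cons hd tl ih =>
    obtain ⟨t, x⟩ := hd
    by_cases h : t = k
    · subst h; simp [pvScanTail]
    · simp [pvScanTail, h, ih]

-- A's outer loop: inserting fresh distinct keys appends, so the items are a filter
theorem pvLoop_items (cond : String → Bool) (look : String → Int) :
    ∀ (l : List (String × Int)) (acc : PySem.Dict String Int),
      (l.map Prod.fst).Nodup →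
      (∀ p ∈ l, look p.1 = p.2) →
      (∀ p ∈ l, acc.contains p.1 = false) →
      ((l.map Prod.fst).foldl
        (fun d k => if cond k then d.insert k (look k) else d) acc).items
        = acc.items ++ l.filter (fun kv => cond kv.1) := by
  intro l
  induction l with
  | nil => intro acc _ _ _; simp
  | cons p rest ih =>
    intro acc hnd hlook hacc
    obtain ⟨k, v⟩ := p
    rw [List.map_cons] at hnd
    have hnd' := List.nodup_cons.mp hnd
    have hknotin : acc.contains k = false := hacc (k, v) (by simp)
    have hlk : look k = v := hlook (k, v) (by simp)
    simp only [List.map, List.foldl_cons, List.filter_cons]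
    by_cases hc : cond k
    · rw [if_pos hc]
      rw [ih (acc.insert k (look k)) hnd'.2
        (fun q hq => hlook q (by simp [hq]))
        (fun q hq => by
          have h1 : acc.contains q.1 = false := hacc q (by simp [hq])
          have h2 : (q.1 == k) = false := by
            refine beq_eq_false_iff_ne.mpr (fun e => hnd'.1 ?_)
            rw [← e]
            exact List.mem_map.mpr ⟨q, hq, rfl⟩
          rw [PySem.Dict.contains_insert, h1, h2, Bool.or_false])]
      rw [PySem.Dict.items_insert_of_not_contains _ _ hknotin]
      simp [hc, hlk]
    · rw [if_neg hc]
      rw [ih acc hnd'.2 (fun q hq => hlook q (by simp [hq])) (fun q hq => hacc q (by simp [hq]))]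
      simp [hc]

-- enumerate keeps the elements as second components
theorem pvEnumMapSnd (l : List String) : ∀ (s : Int),
    (PySem.List.enumerate l s).map Prod.snd = l := by
  induction l with
  | nil => intro s; rfl
  | cons x t ih => intro s; simp [PySem.List.enumerate, ih]

-- enumerate indices start at the offset
theorem pvEnumFstGe (l : List String) : ∀ (s : Int) (p : Int × String),
    p ∈ PySem.List.enumerate l s → s ≤ p.1 := by
  induction l with
  | nil => intro s p hp; simp [PySem.List.enumerate] at hp
  | cons x t ih =>
    intro s p hp
    simp only [PySem.List.enumerate, List.mem_cons] at hp
    rcases hp with h | h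
    · subst h; simp
    · have := ih (s + 1) p h; omega

-- first match in an enumerated nodup list is at the element's index
theorem pvEnumFind (l : List String) : ∀ (s : Int) (j : Nat) (hj : j < l.length),
    l.Nodup →
    (PySem.List.enumerate l s).find? (fun p => p.2 == l[j]) = some (s + j, l[j]) := by
  induction l with
  | nil => intro s j hj _; simp at hj
  | cons x t ih =>
    intro s j hj hnd
    have hnd' := List.nodup_cons.mp hnd
    match j with
    | 0 => simp [PySem.List.enumerate]
    | Nat.succ j' =>
      have hj' : j' < t.length := by simpa using hj
      have hx : (x == t[j']) = false :=
        beq_eq_false_iff_ne.mpr (fun e => hnd'.1 (e ▸ List.getElem_mem hj'))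
      simp only [PySem.List.enumerate, List.find?_cons, List.getElem_cons_succ, hx]
      rw [ih (s + 1) j' hj' hnd'.2]
      congr 2
      omega

-- the fold building pos: last insert wins, and with unique keys it is find?
theorem pvPosGet (l : List (Int × String)) :
    ∀ (d : PySem.Dict String Int) (k : String), (l.map Prod.snd).Nodup →
    (l.foldl (fun d p => d.insert p.2 p.1) d).get? k
      = match l.find? (fun p => p.2 == k) with
        | some p => some p.1
        | none => d.get? k := by
  induction l with
  | nil => intro d k _; rfl
  | cons p rest ih =>
    intro d k hnd
    rw [List.map_cons] at hnd
    have hnd' := List.nodup_cons.mp hnd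
    simp only [List.foldl_cons, List.find?_cons]
    by_cases h : p.2 = k
    · have hb : (p.2 == k) = true := beq_iff_eq.mpr h
      rw [ih _ k hnd'.2]
      have hfind : rest.find? (fun q => q.2 == k) = none := by
        refine List.find?_eq_none.mpr (fun q hq => ?_)
        simp only [beq_iff_eq]
        intro e
        have hm : q.2 ∈ rest.map Prod.snd := List.mem_map.mpr ⟨q, hq, rfl⟩
        rw [e, ← h] at hm
        exact hnd'.1 hm
      rw [hfind]
      simp [h, PySem.Dict.get?_insert_self]
    · have hb : (p.2 == k) = false := beq_eq_false_iff_ne.mpr h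
      rw [ih _ k hnd'.2, hb]
      cases hf : rest.find? (fun q => q.2 == k) with
      | some q => simp
      | none => simp [PySem.Dict.get?_insert_of_ne _ _ (Ne.symm h)]

-- the hit-marking pass: position j ends true iff some edge maps to j
theorem pvHitSpec (pos : PySem.Dict String Int)
    (hpos : ∀ s i, pos.get? s = some i → 0 ≤ i) (dfg : List (String × String)) :
    ∀ (h : List Bool) (j : Nat), j < h.length →
    (dfg.foldl (fun h e =>
      match pos.get? e.1 with
      | some i => PySem.List.pySetD h i true
      | none => h) h).getD j false
      = (h.getD j false || dfg.any (fun e => pos.get? e.1 == some (j : Int))) := by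
  induction dfg with
  | nil => intro h j hj; simp
  | cons e rest ih =>
    intro h j hj
    simp only [List.foldl_cons, List.any_cons]
    cases hg : pos.get? e.1 with
    | none => rw [ih h j hj]; simp
    | some i =>
      have hi : 0 ≤ i := hpos _ _ hg
      have hred : (match some i with
          | some i => PySem.List.pySetD h i true
          | none => h) = PySem.List.pySetD h i true := rfl
      have hset : PySem.List.pySetD h i true = h.set i.toNat true :=
        PySem.List.pySetD_of_nonneg h true hi
      have hlen : (PySem.List.pySetD h i true).length = h.length :=
        PySem.List.length_pySetD h i true
      rw [ih _ j (by rw [hlen]; exact hj), hred, hset]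
      by_cases hij : i.toNat = j
      · have hsome : (some i == some (j : Int)) = true := by
          simp only [beq_iff_eq, Option.some.injEq]; omega
        rw [hsome]
        have : (h.set i.toNat true).getD j false = true := by
          subst hij
          simp [List.getD, hj]
        rw [this]
        simp
      · have hne : (some i == some (j : Int)) = false := by
          simp only [beq_eq_false_iff_ne, ne_eq, Option.some.injEq]; omega
        rw [hne]
        have : (h.set i.toNat true).getD j false = h.getD j false := by
          simp [List.getD, hij]
        rw [this]
        simp

-- B's final indexed pass emits exactly the marked entries, in order
theorem pvOutLoop (f : String → Bool) (look : String → Int) (sa : List (String × Int))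
    (hit : List Bool) :
    ∀ (m s : Nat) (acc : PySem.Dict String Int),
      s + m = sa.length →
      (sa.map Prod.fst).Nodup →
      (∀ p ∈ sa, look p.1 = p.2) →
      (∀ j, j < sa.length → hit.getD j false = f ((sa.map Prod.fst).getD j "")) →
      (∀ p ∈ sa.drop s, acc.contains p.1 = false) →
      ((PySem.List.pyRange (s : Int) (sa.length : Int) 1).foldl
        (fun (d : PySem.Dict String Int) i =>
          if PySem.List.pyGetD hit i false then
            d.insert (PySem.List.pyGetD (sa.map Prod.fst) i "")
              (look (PySem.List.pyGetD (sa.map Prod.fst) i ""))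
          else d) acc).items
        = acc.items ++ (sa.drop s).filter (fun kv => f kv.1) := by
  intro m
  induction m with
  | zero =>
    intro s acc hsm _ _ _ _
    have hs : s = sa.length := by omega
    subst hs
    rw [PySem.List.pyRange_one_eq_nil (by exact_mod_cast le_refl _)]
    simp
  | succ m ih =>
    intro s acc hsm hnd hlook hhit hacc
    have hslt : s < sa.length := by omega
    have hkey : (sa.map Prod.fst).getD s "" = sa[s].1 := by
      rw [List.getD_eq_getElem _ _ (by simpa using hslt)]
      simp
    have hdrop : sa.drop s = sa[s] :: sa.drop (s + 1) := List.drop_eq_getElem_cons hslt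
    have hgetD : PySem.List.pyGetD hit ((s : Nat) : Int) false = f sa[s].1 := by
      rw [PySem.List.pyGetD_natCast, hhit s hslt, hkey]
    rw [PySem.List.pyRange_one_cons (by exact_mod_cast hslt), List.foldl_cons, hdrop,
      List.filter_cons]
    have hmem : sa[s] ∈ sa.drop s := by rw [hdrop]; exact List.mem_cons_self
    have hkeyPy : PySem.List.pyGetD (sa.map Prod.fst) ((s : Nat) : Int) "" = sa[s].1 := by
      rw [PySem.List.pyGetD_natCast, hkey]
    have hkeys_drop : (sa.map Prod.fst).drop s = sa[s].1 :: (sa.map Prod.fst).drop (s + 1) := by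
      rw [← List.map_drop, hdrop, List.map_cons, List.map_drop]
    have hnd_drop : ((sa.map Prod.fst).drop s).Nodup :=
      hnd.sublist (List.drop_sublist s _)
    have hhead_notin : sa[s].1 ∉ (sa.map Prod.fst).drop (s + 1) := by
      rw [hkeys_drop] at hnd_drop
      exact (List.nodup_cons.mp hnd_drop).1
    have hstep : ((s : Int) + 1) = (((s + 1 : Nat)) : Int) := by push_cast; ring
    by_cases hc : f sa[s].1 = true
    · rw [hgetD, if_pos hc, if_pos hc]
      have hlk : look sa[s].1 = sa[s].2 := hlook sa[s] (List.getElem_mem hslt)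
      have hcontains : acc.contains sa[s].1 = false := hacc sa[s] hmem
      rw [hkeyPy, hlk, hstep,
        ih (s + 1) (acc.insert sa[s].1 sa[s].2) (by omega) hnd hlook hhit
          (fun q hq => by
            have hq' : q ∈ sa.drop s := by rw [hdrop]; exact List.mem_cons_of_mem _ hq
            have h1 : acc.contains q.1 = false := hacc q hq'
            have h2 : (q.1 == sa[s].1) = false := by
              refine beq_eq_false_iff_ne.mpr (fun e => hhead_notin ?_)
              rw [← e, ← List.map_drop]
              exact List.mem_map.mpr ⟨q, hq, rfl⟩
            rw [PySem.Dict.contains_insert, h1, h2, Bool.or_false]),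
        PySem.Dict.items_insert_of_not_contains _ _ hcontains]
      simp
    · rw [hgetD, if_neg hc, if_neg hc, hstep,
        ih (s + 1) acc (by omega) hnd hlook hhit
          (fun q hq => hacc q (by rw [hdrop]; exact List.mem_cons_of_mem _ hq))]

-- ===== VERDICT (by name: the statement is the Claim_ definition above) =====
theorem check_start_act_to_include_spec : Claim_equal_check_start_act_to_include := by
  intro dfg sa _ hpre
  unfold Spec_check_start_act_to_include check_start_act_to_include check_start_act_to_include_alt
  have hlook : ∀ p ∈ sa, (PySem.Dict.mk sa).getD p.1 0 = p.2 := fun q hq =>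
    PySem.Dict.getD_of_mem_items _ (by simpa using hq) (by simpa [PySem.Dict.keys] using hpre) 0
  -- A's side: the filter of sa by the scan test
  rw [pvLoop_items (fun k => pvScanTail dfg k) (fun k => (PySem.Dict.mk sa).getD k 0) sa
    PySem.Dict.empty hpre hlook (fun q _ => PySem.Dict.contains_empty _)]
  -- B's side
  simp only [List.length_map]
  set keys := sa.map Prod.fst with hkeys
  set pos : PySem.Dict String Int :=
    (PySem.List.enumerate keys).foldl (fun d p => d.insert p.2 p.1) PySem.Dict.empty with hposdef
  have hndk : keys.Nodup := hpre
  have hposchar : ∀ k, pos.get? k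
      = match (PySem.List.enumerate keys).find? (fun p => p.2 == k) with
        | some p => some p.1
        | none => none := by
    intro k
    rw [hposdef, pvPosGet _ _ _ (by rw [pvEnumMapSnd]; exact hndk)]
    cases (PySem.List.enumerate keys).find? (fun p => p.2 == k) <;> simp [PySem.Dict.get?_empty]
  have hposnn : ∀ s i, pos.get? s = some i → 0 ≤ i := by
    intro s i hg
    rw [hposchar] at hg
    cases hf : (PySem.List.enumerate keys).find? (fun p => p.2 == s) with
    | none => rw [hf] at hg; simp at hg
    | some p =>
      rw [hf] at hg
      simp only [Option.some.injEq] at hg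
      have := pvEnumFstGe keys 0 p (List.mem_of_find?_eq_some hf)
      omega
  have hposat : ∀ (j : Nat) (hj : j < keys.length), pos.get? keys[j] = some (j : Int) := by
    intro j hj
    rw [hposchar, pvEnumFind keys 0 j hj hndk]
    simp
  have hposnone : ∀ k, k ∉ keys → pos.get? k = none := by
    intro k hk
    rw [hposchar]
    have : (PySem.List.enumerate keys).find? (fun p => p.2 == k) = none := by
      refine List.find?_eq_none.mpr (fun q hq => ?_)
      simp only [beq_iff_eq]
      intro e
      exact hk (e ▸ (pvEnumMapSnd keys 0 ▸ List.mem_map.mpr ⟨q, hq, rfl⟩))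
    rw [this]
  -- translate the hit array into the scan test
  have hhit : ∀ j, j < sa.length →
      (dfg.foldl (fun h e =>
        match pos.get? e.1 with
        | some i => PySem.List.pySetD h i true
        | none => h) (List.replicate sa.length false)).getD j false
      = pvScanTail dfg (keys.getD j "") := by
    intro j hj
    have hjk : j < keys.length := by simpa [hkeys] using hj
    rw [pvHitSpec pos hposnn dfg _ j (by simpa using hj)]
    rw [List.getD_eq_getElem _ _ (by simpa using hj), List.getElem_replicate, Bool.false_or]
    rw [List.getD_eq_getElem _ _ hjk, pvScanTail_eq_any]
    refine PySem.List.any_congr_mem (fun e _ => ?_)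
    by_cases hm : e.1 ∈ keys
    · obtain ⟨j', hj', he⟩ := List.mem_iff_getElem.mp hm
      rw [← he, hposat j' hj']
      by_cases hjj : j' = j
      · subst hjj; simp
      · have h1 : (some (j' : Int) == some (j : Int)) = false := by
          simp only [beq_eq_false_iff_ne, ne_eq, Option.some.injEq]
          omega
        have h2 : (keys[j'] == keys[j]) = false := by
          refine beq_eq_false_iff_ne.mpr (fun e => hjj ?_)
          exact (List.Nodup.getElem_inj_iff hndk).mp e
        rw [h1, h2]
    · rw [hposnone _ hm]
      have : (e.1 == keys[j]) = false :=
        beq_eq_false_iff_ne.mpr (fun he => hm (he ▸ List.getElem_mem hjk))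
      simp [this]
  have hB := pvOutLoop (fun k => pvScanTail dfg k) (fun k => (PySem.Dict.mk sa).getD k 0) sa
    (dfg.foldl (fun h e =>
      match pos.get? e.1 with
      | some i => PySem.List.pySetD h i true
      | none => h) (List.replicate sa.length false))
    sa.length 0 PySem.Dict.empty (by omega) hpre hlook
    (fun j hj => hhit j hj)
    (fun q _ => PySem.Dict.contains_empty _)
  rw [Nat.cast_zero] at hB
  rw [hB]
  simp
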